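-- pv_equiv track=rewrite | github.com/becker94/99-probl-me | 99 probleme/stormtroopers/solution.py | stormtroopers
-- ===== SOURCE A (Python) =====
-- from typing import List
--
-- def stormtroopers(numbers: List[int]) -> List[int]:
--     occurrences = {}
--
--     for number in numbers:
--         if number in occurrences:
--             occurrences[number] += 1
--         else:
--             occurrences[number] = 1
--     numbers_list = []
--     for number in numbers:
--         if occurrences[number] == 1:
--             numbers_list.append(number)
--
--     return numbers_list
-- ===== SOURCE B (Python) =====
-- def stormtroopers(numbers):
--     survivors = dict()
--     dupes = set()
--     for n in numbers:
--         if n in dupes: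
--             continue
--         if n in survivors:
--             del survivors[n]
--             dupes.add(n)
--         else:
--             survivors[n] = None
--     return list(survivors)
-- ===== Notes on version B (the rewrite author's own statement) =====
-- stated objective: alternative
-- what changed: Replaces A's two staged passes (build a count table, then filter the list) by a single online pass that maintains the answer itself in an insertion-ordered dict: each element is appended on first sight, evicted and banned on second sight, and skipped thereafter.
import Mathlib
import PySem

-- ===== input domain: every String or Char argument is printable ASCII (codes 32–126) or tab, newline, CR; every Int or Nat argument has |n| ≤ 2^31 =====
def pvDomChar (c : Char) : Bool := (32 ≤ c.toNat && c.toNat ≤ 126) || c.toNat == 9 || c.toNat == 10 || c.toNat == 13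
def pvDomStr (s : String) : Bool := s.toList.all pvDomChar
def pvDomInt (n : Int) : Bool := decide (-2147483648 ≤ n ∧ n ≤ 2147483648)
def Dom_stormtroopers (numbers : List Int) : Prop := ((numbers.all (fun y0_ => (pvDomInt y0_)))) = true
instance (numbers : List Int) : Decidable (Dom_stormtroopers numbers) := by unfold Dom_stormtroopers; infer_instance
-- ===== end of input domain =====

-- B replaces A's two staged passes (count table, then filter) by ONE online pass that
-- maintains the answer itself in an ordered dict: append on first sight, evict and ban
-- on second sight, skip thereafter (objective: alternative).

-- ===== PORT A =====
def stormtroopers (numbers : List Int) : List Int :=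
  let occurrences : PySem.Dict Int Int :=
    numbers.foldl (fun d number =>
      if d.contains number then d.insert number (d.getD number 0 + 1)
      else d.insert number 1) PySem.Dict.empty
  numbers.foldl (fun numbers_list number =>
    if occurrences.getD number 0 == 1 then numbers_list ++ [number] else numbers_list) []

-- ===== PORT B =====
-- one step of B's loop body: skip banned, evict-and-ban on second sight, append on first
-- (state = survivors ordered dict (values all None), dupes ban set)
def pvStepB (st : PySem.Dict Int (Option Int) × PySem.Set Int) (n : Int) :
    PySem.Dict Int (Option Int) × PySem.Set Int :=
  if PySem.Set.contains st.2 n then st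
  else if st.1.contains n then (st.1.erase n, PySem.Set.add st.2 n)
  else (st.1.insert n none, st.2)

def stormtroopers_alt (numbers : List Int) : List Int :=
  (numbers.foldl pvStepB (PySem.Dict.empty, PySem.Set.empty)).1.keys

-- ===== PRECONDITION & SPEC =====
def Spec_stormtroopers (numbers : List Int) (out : List Int) : Prop := out = stormtroopers_alt numbers
instance (numbers : List Int) (out : List Int) : Decidable (Spec_stormtroopers numbers out) := by unfold Spec_stormtroopers; infer_instance

-- ===== CLAIM (what is proved, stated in full; the proofs are below) =====
def Claim_equal_stormtroopers : Prop := ∀ (numbers : List Int), Dom_stormtroopers numbers → Spec_stormtroopers numbers (stormtroopers numbers)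

-- ===== LEMMAS AND PROOFS =====

-- A's counting loop (branch on membership) builds exactly the Counter of the list.
theorem pv_branchy_fold_getD (l : List Int) (d : PySem.Dict Int Int) (v : Int) :
    (l.foldl (fun d number =>
      if d.contains number then d.insert number (d.getD number 0 + 1)
      else d.insert number 1) d).getD v 0 = d.getD v 0 + (l.count v : Int) := by
  induction l generalizing d with
  | nil => simp
  | cons x xs ih =>
    simp only [List.foldl_cons]
    by_cases h : d.contains x = true
    · rw [if_pos h, ih, PySem.Dict.getD_insert]
      by_cases hv : v = x
      · subst hv; simp; ring
      · simp [hv, Ne.symm hv]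
    · have h0 : d.getD x 0 = 0 := PySem.Dict.getD_of_not_contains _ _ (by simpa using h)
      rw [if_neg h, ih, PySem.Dict.getD_insert]
      by_cases hv : v = x
      · subst hv; simp [h0]; ring
      · simp [hv, Ne.symm hv]

-- the canonical "appears exactly once in p" result list
def pvRes (p : List Int) : List Int := p.filter (fun x => p.count x == 1)

theorem pv_count_app_self (p : List Int) (n : Int) :
    (p ++ [n]).count n = p.count n + 1 := by
  simp [List.count_append]

theorem pv_count_app_ne (p : List Int) (n x : Int) (h : x ≠ n) :
    (p ++ [n]).count x = p.count x := by
  have : List.count x [n] = 0 := List.count_eq_zero.mpr (by simp [h])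
  simp [List.count_append, this]

theorem pv_mem_res (p : List Int) (n : Int) : n ∈ pvRes p ↔ p.count n = 1 := by
  unfold pvRes
  rw [List.mem_filter]
  constructor
  · rintro ⟨_, h⟩; simpa using h
  · intro h; exact ⟨List.count_pos_iff.mp (by omega), by simpa using h⟩

theorem pv_res_nodup (p : List Int) : (pvRes p).Nodup := by
  rw [List.nodup_iff_count_le_one]
  intro a
  by_cases h : p.count a = 1
  · have := (List.filter_sublist (l := p) (p := fun x => p.count x == 1)).count_le a
    rw [pvRes]; omega
  · have : (pvRes p).count a = 0 := by
      rw [List.count_eq_zero]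
      intro hmem
      exact h ((pv_mem_res p a).mp hmem)
    omega

theorem pv_filter_p_congr (p : List Int) (n : Int) (h : ¬ p.count n = 1) :
    List.filter (fun x => (p ++ [n]).count x == 1) p
      = List.filter (fun x => p.count x == 1) p := by
  apply List.filter_congr
  intro x hx
  by_cases hxn : x = n
  · rw [hxn, pv_count_app_self]
    have hpos := List.count_pos_iff.mpr (hxn ▸ hx)
    have h1 : (p.count n + 1 == 1) = false := by simp; omega
    have h2 : (p.count n == 1) = false := by simpa using h
    rw [h1, h2]
  · rw [pv_count_app_ne p n x hxn]

theorem pv_res_append_ge2 (p : List Int) (n : Int) (h : 2 ≤ p.count n) :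
    pvRes (p ++ [n]) = pvRes p := by
  unfold pvRes
  rw [List.filter_append]
  have hn : List.filter (fun x => (p ++ [n]).count x == 1) [n] = [] := by
    simp; omega
  rw [hn, List.append_nil, pv_filter_p_congr p n (by omega)]

theorem pv_res_append_one (p : List Int) (n : Int) (h : p.count n = 1) :
    pvRes (p ++ [n]) = (pvRes p).erase n := by
  rw [(pv_res_nodup p).erase_eq_filter]
  unfold pvRes
  rw [List.filter_append, List.filter_filter]
  have hn : List.filter (fun x => (p ++ [n]).count x == 1) [n] = [] := by
    simp [h]
  rw [hn, List.append_nil]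
  apply List.filter_congr
  intro x hx
  by_cases hxn : x = n
  · rw [hxn]
    have h1 : ((p ++ [n]).count n == 1) = false := by
      rw [pv_count_app_self, h]; simp
    rw [h1]; simp
  · rw [pv_count_app_ne p n x hxn]
    simp [hxn]

theorem pv_res_append_zero (p : List Int) (n : Int) (h : p.count n = 0) :
    pvRes (p ++ [n]) = pvRes p ++ [n] := by
  unfold pvRes
  rw [List.filter_append]
  have hn : List.filter (fun x => (p ++ [n]).count x == 1) [n] = [n] := by
    simp [h]
  rw [hn]
  congr 1
  apply List.filter_congr
  intro x hx
  by_cases hxn : x = n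
  · exact absurd (List.count_pos_iff.mpr (hxn ▸ hx)) (by omega)
  · rw [pv_count_app_ne p n x hxn]

-- keys of an erase are the keys with that key filtered out
theorem pv_keys_erase (d : PySem.Dict Int (Option Int)) (n : Int) :
    (d.erase n).keys = d.keys.filter (fun x => !(x == n)) := by
  simp [PySem.Dict.erase, PySem.Dict.keys, List.filter_map]
  rfl

-- the loop invariant: starting from a survivors dict whose keys are the answer for the
-- prefix p (and a ban set holding exactly the elements seen at least twice in p), the
-- fold over l produces the answer for p ++ l
theorem pv_b_inv (l : List Int) : ∀ (p : List Int) (d : PySem.Dict Int (Option Int))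
    (b : PySem.Set Int),
    d.keys = pvRes p →
    (∀ x, PySem.Set.contains b x = true ↔ 2 ≤ p.count x) →
    (l.foldl pvStepB (d, b)).1.keys = pvRes (p ++ l) := by
  induction l with
  | nil => intro p d b hk _; simpa using hk
  | cons n t ih =>
    intro p d b hk hb
    have hdc : ∀ x, d.contains x = true ↔ p.count x = 1 := by
      intro x
      rw [PySem.Dict.contains_iff_mem_keys, hk, pv_mem_res]
    have happ : p ++ n :: t = (p ++ [n]) ++ t := by simp
    rw [List.foldl_cons, happ]
    by_cases h2 : 2 ≤ p.count n
    · -- banned: skip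
      have hc : PySem.Set.contains b n = true := (hb n).mpr h2
      have hstep : pvStepB (d, b) n = (d, b) := by
        unfold pvStepB; rw [hc]; simp
      rw [hstep]
      apply ih
      · rw [hk, pv_res_append_ge2 p n h2]
      · intro x
        rw [hb x]
        by_cases hxn : x = n
        · subst hxn; rw [pv_count_app_self]
          constructor <;> (intro; omega)
        · rw [pv_count_app_ne p n x hxn]
    · have hc : PySem.Set.contains b n = false := by
        apply Bool.eq_false_iff.mpr
        intro htrue
        exact h2 ((hb n).mp htrue)
      by_cases h1 : p.count n = 1
      · -- second sight: evict and ban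
        have hmem : d.contains n = true := (hdc n).mpr h1
        have hstep : pvStepB (d, b) n = (d.erase n, PySem.Set.add b n) := by
          unfold pvStepB; rw [hc, hmem]; simp
        rw [hstep]
        apply ih
        · rw [pv_keys_erase, hk, pv_res_append_one p n h1,
            (pv_res_nodup p).erase_eq_filter]
          rfl
        · intro x
          rw [PySem.Set.contains_iff, PySem.Set.mem_add, ← PySem.Set.contains_iff, hb x]
          by_cases hxn : x = n
          · subst hxn; rw [pv_count_app_self, h1]
            constructor <;> (intro; omega)
          · rw [pv_count_app_ne p n x hxn]
            simp [hxn]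
      · -- first sight: append
        have h0 : p.count n = 0 := by omega
        have hmem : d.contains n = false := by
          apply Bool.eq_false_iff.mpr
          intro htrue
          exact h1 ((hdc n).mp htrue)
        have hstep : pvStepB (d, b) n = (d.insert n none, b) := by
          unfold pvStepB; rw [hc, hmem]; simp
        rw [hstep]
        apply ih
        · rw [PySem.Dict.keys_insert_of_not_contains _ _ _, hk,
            pv_res_append_zero p n h0]
          exact hmem
        · intro x
          rw [hb x]
          by_cases hxn : x = n
          · subst hxn; rw [pv_count_app_self, h0]
            constructor <;> (intro; omega)
          · rw [pv_count_app_ne p n x hxn]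

theorem pv_alt_eq_res (numbers : List Int) : stormtroopers_alt numbers = pvRes numbers := by
  unfold stormtroopers_alt
  have := pv_b_inv numbers [] PySem.Dict.empty PySem.Set.empty
    (by simp [PySem.Dict.keys, PySem.Dict.empty, pvRes])
    (by intro x; simp [PySem.Set.contains, PySem.Set.empty])
  simpa [pvRes] using this

-- ===== VERDICT (by name: the statement is the Claim_ definition above) =====
theorem stormtroopers_spec : Claim_equal_stormtroopers := by
  intro numbers _
  unfold Spec_stormtroopers stormtroopers
  rw [pv_alt_eq_res]
  simp only []
  rw [PySem.List.foldl_append_if_eq_filter]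
  simp only [List.nil_append, pvRes]
  apply List.filter_congr
  intro n hn
  rw [pv_branchy_fold_getD]
  by_cases h : numbers.count n = 1
  · simp [h]
  · have h2 : ((numbers.count n : Int) = 1) → False := by
      intro hc; exact h (by exact_mod_cast hc)
    simp [h]
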